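-- pv_equiv track=rewrite | github.com/ctroise/buildozer | Evens/evens.py | how_many_ways
-- ===== SOURCE A (Python) =====
-- from itertools import combinations, product
--
-- def how_many_ways(total, p_lists):
--     lists = [xx for xx in p_lists if xx]
--     res = []
--     for xx in product(*lists):
--         if len(set(xx)) != len(xx):
--             continue  # oops, a number repeats!
--         ss = sum(xx)
--         if ss == total:
--             res.append(xx)
--         joe = 12
--     return res
-- ===== SOURCE B (Python) =====
-- def how_many_ways(total, p_lists):
--     lists = [x for x in p_lists if x]
--
--     def go(rest, chosen, s):
--         if not rest:
--             return [tuple(chosen)] if s == total else []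
--         return [t for v in rest[0] if v not in chosen
--                 for t in go(rest[1:], chosen + [v], s + v)]
--
--     return go(lists, [], 0)
-- ===== Notes on version B (the rewrite author's own statement) =====
-- stated objective: alternative
-- what changed: Replaced the full-cartesian-product enumeration followed by per-tuple duplicate/sum filtering with a recursive backtracking search that carries the chosen prefix and running sum and skips already-used values before recursing.
import Mathlib
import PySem

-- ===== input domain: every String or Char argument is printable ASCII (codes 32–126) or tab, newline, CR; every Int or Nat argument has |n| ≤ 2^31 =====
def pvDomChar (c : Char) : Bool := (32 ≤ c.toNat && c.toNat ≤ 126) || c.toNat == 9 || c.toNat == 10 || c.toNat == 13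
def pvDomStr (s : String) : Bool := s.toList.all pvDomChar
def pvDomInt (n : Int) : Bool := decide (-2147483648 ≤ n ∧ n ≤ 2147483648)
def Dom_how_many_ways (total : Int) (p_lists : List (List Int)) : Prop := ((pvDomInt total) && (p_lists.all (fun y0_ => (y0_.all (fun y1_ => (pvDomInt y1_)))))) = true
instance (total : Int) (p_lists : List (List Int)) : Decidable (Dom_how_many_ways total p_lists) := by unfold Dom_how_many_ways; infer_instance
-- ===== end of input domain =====

-- B replaces A's full cartesian-product enumeration + filtering by a recursive
-- backtracking search carrying the chosen prefix and running sum (objective: alternative).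

-- ===== PORT A =====
-- itertools.product(*lists), first list varying slowest
def pyProduct : List (List Int) → List (List Int)
  | [] => [[]]
  | l :: ls => l.flatMap (fun x => (pyProduct ls).map (fun t => x :: t))

def how_many_ways (total : Int) (p_lists : List (List Int)) : List (List Int) :=
  let lists := p_lists.filter (fun xx => !xx.isEmpty)
  (pyProduct lists).foldl (fun res xx =>
    if (PySem.Set.ofList xx).length ≠ xx.length then res
    else
      if xx.sum = total then res ++ [xx] else res) []

-- ===== PORT B =====
-- Source B's recursive helper go(rest, chosen, s)
def hmwGo (total : Int) : List (List Int) → List Int → Int → List (List Int)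
  | [], chosen, s => if s = total then [chosen] else []
  | l :: ls, chosen, s =>
      (l.filter (fun v => !chosen.contains v)).flatMap
        (fun v => hmwGo total ls (chosen ++ [v]) (s + v))

def how_many_ways_alt (total : Int) (p_lists : List (List Int)) : List (List Int) :=
  hmwGo total (p_lists.filter (fun xx => !xx.isEmpty)) [] 0

-- ===== PRECONDITION & SPEC =====
def Spec_how_many_ways (total : Int) (p_lists : List (List Int)) (out : List (List Int)) : Prop := out = how_many_ways_alt total p_lists
instance (total : Int) (p_lists : List (List Int)) (out : List (List Int)) : Decidable (Spec_how_many_ways total p_lists out) := by unfold Spec_how_many_ways; infer_instance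

-- ===== CLAIM (what is proved, stated in full; the proofs are below) =====
def Claim_equal_how_many_ways : Prop := ∀ (total : Int) (p_lists : List (List Int)), Dom_how_many_ways total p_lists → Spec_how_many_ways total p_lists (how_many_ways total p_lists)

-- ===== LEMMAS AND PROOFS =====

-- length of a foldl-built Set is bounded by input length
theorem hmw_foldl_add_len_le (xs : List Int) : ∀ (s : List Int),
    (xs.foldl PySem.Set.add s).length ≤ s.length + xs.length := by
  induction xs with
  | nil => intro s; simp
  | cons x xs ih =>
      intro s
      simp only [List.foldl_cons]
      refine le_trans (ih (PySem.Set.add s x)) ?_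
      simp only [PySem.Set.add]
      split <;> simp <;> omega

-- length equality characterises "no new duplicates"
theorem hmw_foldl_add_len_eq (xs : List Int) : ∀ (s : List Int),
    ((xs.foldl PySem.Set.add s).length = s.length + xs.length) ↔
      ((∀ x ∈ xs, x ∉ s) ∧ xs.Nodup) := by
  induction xs with
  | nil => intro s; simp
  | cons x xs ih =>
      intro s
      simp only [List.foldl_cons]
      by_cases hx : x ∈ s
      · have hadd : PySem.Set.add s x = s := by
          simp [PySem.Set.add, hx]
        rw [hadd]
        constructor
        · intro h
          have := hmw_foldl_add_len_le xs s
          simp [List.length_cons] at h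
          omega
        · rintro ⟨h1, -⟩
          exact absurd hx (h1 x (by simp))
      · have hadd : PySem.Set.add s x = s ++ [x] := by
          simp [PySem.Set.add, hx]
        rw [hadd]
        have h := ih (s ++ [x])
        simp only [List.length_append, List.length_cons, List.length_nil] at h ⊢
        rw [show s.length + (xs.length + 1) = s.length + 1 + xs.length from by omega, h]
        constructor
        · rintro ⟨h1, h2⟩
          refine ⟨?_, List.nodup_cons.mpr ⟨?_, h2⟩⟩
          · intro y hy
            rcases List.mem_cons.mp hy with rfl | hy'
            · exact hx
            · exact fun hc => h1 y hy' (List.mem_append.mpr (Or.inl hc))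
          · intro hc
            exact h1 x hc (List.mem_append.mpr (Or.inr (List.mem_singleton.mpr rfl)))
        · rintro ⟨h1, h2⟩
          obtain ⟨hxn, h2'⟩ := List.nodup_cons.mp h2
          refine ⟨?_, h2'⟩
          intro y hy hc
          rcases List.mem_append.mp hc with hc' | hc'
          · exact h1 y (List.mem_cons.mpr (Or.inr hy)) hc'
          · exact hxn ((List.mem_singleton.mp hc') ▸ hy)

theorem hmw_ofList_len_iff (xs : List Int) :
    ((PySem.Set.ofList xs).length = xs.length) ↔ xs.Nodup := by
  rw [PySem.Set.ofList_eq_foldl]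
  have := hmw_foldl_add_len_eq xs []
  simp at this
  simpa using this

theorem hmw_flatMap_filter {α β : Type} (q : α → Bool) (F : α → List β) (l : List α) :
    (l.filter q).flatMap F = l.flatMap (fun v => if q v then F v else []) := by
  induction l with
  | nil => rfl
  | cons x xs ih =>
      by_cases hx : q x <;> simp [hx, ih]

theorem hmw_mff {α β γ : Type} (g : β → γ) (p : β → Bool) (f : α → List β) (l : List α) :
    ((l.flatMap f).filter p).map g = l.flatMap (fun x => ((f x).filter p).map g) := by
  induction l with
  | nil => rfl
  | cons x xs ih => simp [List.flatMap_cons, List.filter_append, ih]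

-- the backtracking recursion computes A's filtered product, shifted by (chosen, s)
theorem hmwGo_eq (total : Int) : ∀ (rest : List (List Int)) (chosen : List Int) (s : Int),
    hmwGo total rest chosen s =
      ((pyProduct rest).filter
          (fun xx => decide ((∀ v ∈ xx, v ∉ chosen) ∧ xx.Nodup ∧ s + xx.sum = total))).map
        (fun xx => chosen ++ xx) := by
  intro rest
  induction rest with
  | nil =>
      intro chosen s
      simp only [hmwGo, pyProduct]
      by_cases h : s = total <;> simp [h]
  | cons l ls ih =>
      intro chosen s
      simp only [hmwGo, pyProduct]
      rw [hmw_flatMap_filter]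
      rw [List.flatMap_congr (fun v _ => by rw [ih (chosen ++ [v]) (s + v)])]
      rw [hmw_mff]
      apply List.flatMap_congr
      intro v _
      by_cases hv : v ∈ chosen
      · simp only [List.contains_eq_mem, hv, decide_true, Bool.not_true,
          Bool.false_eq_true, if_false]
        rw [List.filter_map]
        have hfalse : ∀ xx ∈ pyProduct ls,
            ((fun xx => decide ((∀ v ∈ xx, v ∉ chosen) ∧ xx.Nodup ∧ s + xx.sum = total)) ∘
              (fun t => v :: t)) xx = (fun _ => false) xx := by
          intro xx _
          simp only [Function.comp, decide_eq_false_iff_not]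
          rintro ⟨h1, -, -⟩
          exact h1 v (by simp) hv
        rw [List.filter_congr hfalse]
        simp
      · simp only [List.contains_eq_mem, hv, decide_false, Bool.not_false, if_true]
        rw [List.filter_map]
        have hpred : ∀ xx ∈ pyProduct ls,
            (decide ((∀ u ∈ xx, u ∉ chosen ++ [v]) ∧ xx.Nodup ∧ (s + v) + xx.sum = total))
              = ((fun xx => decide ((∀ u ∈ xx, u ∉ chosen) ∧ xx.Nodup ∧ s + xx.sum = total)) ∘
                  (fun t => v :: t)) xx := by
          intro xx _
          simp only [Function.comp]
          apply decide_eq_decide.mpr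
          constructor
          · rintro ⟨h1, h2, h3⟩
            refine ⟨?_, List.nodup_cons.mpr ⟨?_, h2⟩, ?_⟩
            · intro u hu
              rcases List.mem_cons.mp hu with rfl | hu'
              · exact hv
              · exact fun hc => h1 u hu' (List.mem_append.mpr (Or.inl hc))
            · intro hc
              exact h1 v hc (List.mem_append.mpr (Or.inr (List.mem_singleton.mpr rfl)))
            · simp only [List.sum_cons]
              omega
          · rintro ⟨h1, h2, h3⟩
            obtain ⟨hvx, h2'⟩ := List.nodup_cons.mp h2
            refine ⟨?_, h2', ?_⟩
            · intro u hu hc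
              rcases List.mem_append.mp hc with hc' | hc'
              · exact h1 u (List.mem_cons.mpr (Or.inr hu)) hc'
              · exact hvx ((List.mem_singleton.mp hc') ▸ hu)
            · simp only [List.sum_cons] at h3
              omega
        rw [List.filter_congr hpred, List.map_map]
        apply List.map_congr_left
        intro xx _
        simp

theorem hmw_main (total : Int) (p_lists : List (List Int)) :
    how_many_ways total p_lists = how_many_ways_alt total p_lists := by
  unfold how_many_ways how_many_ways_alt
  rw [hmwGo_eq]
  set lists := p_lists.filter (fun xx => !xx.isEmpty)
  have hstep : ∀ (res : List (List Int)) (xx : List Int),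
      (if (PySem.Set.ofList xx).length ≠ xx.length then res
       else if xx.sum = total then res ++ [xx] else res)
        = (if ((∀ v ∈ xx, v ∉ ([] : List Int)) ∧ xx.Nodup ∧ (0 : Int) + xx.sum = total)
            then res ++ [xx] else res) := by
    intro res xx
    by_cases hnd : xx.Nodup
    · have hlen : (PySem.Set.ofList xx).length = xx.length := (hmw_ofList_len_iff xx).mpr hnd
      simp [hlen, hnd]
    · have hlen : (PySem.Set.ofList xx).length ≠ xx.length := by
        intro hc; exact hnd ((hmw_ofList_len_iff xx).mp hc)
      simp [hlen, hnd]
  calc (pyProduct lists).foldl (fun res xx =>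
          if (PySem.Set.ofList xx).length ≠ xx.length then res
          else if xx.sum = total then res ++ [xx] else res) []
      = (pyProduct lists).foldl (fun res xx =>
          if ((∀ v ∈ xx, v ∉ ([] : List Int)) ∧ xx.Nodup ∧ (0 : Int) + xx.sum = total)
            then res ++ [xx] else res) [] := by
        apply PySem.List.foldl_congr_mem
        intro res xx _
        exact hstep res xx
    _ = _ := by
        rw [PySem.List.foldl_append_ite_eq_filter]
        simp

-- ===== VERDICT (by name: the statement is the Claim_ definition above) =====
theorem how_many_ways_spec : Claim_equal_how_many_ways := by
  intro total p_lists _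
  unfold Spec_how_many_ways
  exact hmw_main total p_lists
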